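-- pv_equiv track=rewrite | github.com/MedVietAI/processing | utils/augment.py | is_invalid_response
-- ===== SOURCE A (Python) =====
-- def is_invalid_response(text: str) -> bool:
--     """Check if model response is invalid (Fail, Invalid, etc.)"""
--     if not text or not isinstance(text, str):
--         return True
--
--     text_lower = text.lower().strip()
--     invalid_patterns = [
--         "fail", "invalid", "i couldn't", "i can't", "i cannot", "unable to",
--         "sorry", "error", "not available", "no answer", "insufficient",
--         "don't know", "do not know", "not sure", "cannot determine",
--         "unable to provide", "not possible", "not applicable", "n/a"
--     ]
--
--     # Check if response is too short or matches invalid patterns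
--     if len(text_lower) < 3:
--         return True
--
--     for pattern in invalid_patterns:
--         if pattern in text_lower:
--             return True
--
--     return False
-- ===== SOURCE B (Python) =====
-- def is_invalid_response(text: str) -> bool:
--     """Check if model response is invalid (Fail, Invalid, etc.)"""
--     if not text or not isinstance(text, str):
--         return True
--
--     text_lower = text.lower().strip()
--     invalid_patterns = [
--         "fail", "invalid", "i couldn't", "i can't", "i cannot", "unable to",
--         "sorry", "error", "not available", "no answer", "insufficient",
--         "don't know", "do not know", "not sure", "cannot determine",
--         "unable to provide", "not possible", "not applicable", "n/a"
--     ]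
--
--     if len(text_lower) < 3:
--         return True
--
--     # Streaming NFA simulation: one left-to-right pass over the text carrying the
--     # set of in-progress pattern suffixes; never re-reads a character.
--     active = []  # suffixes of patterns whose earlier characters matched up to here
--     for ch in text_lower:
--         pool = invalid_patterns + active
--         if any(p[0] == ch and len(p) == 1 for p in pool):
--             return True
--         active = [p[1:] for p in pool if p[0] == ch and len(p) > 1]
--     return False
-- ===== Notes on version B (the rewrite author's own statement) =====
-- stated objective: alternative
-- what changed: Replaces A's per-pattern substring scans by a single streaming pass that simulates the multi-pattern NFA: it maintains the set of in-progress pattern suffixes, advancing each by the current character, so the text is read exactly once instead of once per pattern.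
import Mathlib
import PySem

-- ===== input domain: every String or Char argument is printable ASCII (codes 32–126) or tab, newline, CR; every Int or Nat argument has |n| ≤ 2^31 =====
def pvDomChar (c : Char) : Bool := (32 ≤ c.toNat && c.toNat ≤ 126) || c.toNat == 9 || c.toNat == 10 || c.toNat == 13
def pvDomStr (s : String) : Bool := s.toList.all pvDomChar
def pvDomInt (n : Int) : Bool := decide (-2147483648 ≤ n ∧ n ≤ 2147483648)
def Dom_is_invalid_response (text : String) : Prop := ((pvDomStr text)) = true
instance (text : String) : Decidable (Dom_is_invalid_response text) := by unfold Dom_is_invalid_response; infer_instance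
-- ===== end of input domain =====

-- B replaces A's per-pattern substring scans by one streaming pass that carries the set of
-- in-progress pattern suffixes (an NFA simulation); same asymptotic cost, different algorithm.

-- ===== PORT A =====
def pvInvalidPatterns : List String :=
  ["fail", "invalid", "i couldn't", "i can't", "i cannot", "unable to",
   "sorry", "error", "not available", "no answer", "insufficient",
   "don't know", "do not know", "not sure", "cannot determine",
   "unable to provide", "not possible", "not applicable", "n/a"]

def is_invalid_response (text : String) : Bool :=
  if text = "" then true
  else
    let textLower := PySem.Str.strip (PySem.Str.lower text)
    if PySem.Str.len textLower < 3 then true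
    else pvInvalidPatterns.any (fun p => PySem.Str.isIn p textLower)

-- ===== PORT B =====
def pvInvalidPatternsB : List String :=
  ["fail", "invalid", "i couldn't", "i can't", "i cannot", "unable to",
   "sorry", "error", "not available", "no answer", "insufficient",
   "don't know", "do not know", "not sure", "cannot determine",
   "unable to provide", "not possible", "not applicable", "n/a"]

-- the for-loop over text characters carrying `active` (in-progress pattern suffixes);
-- `p[0] == ch` on the nonempty pool elements is `p.head? == some c` (exact: pool is never empty-string)
def pvScan (pats : List (List Char)) : List Char → List (List Char) → Bool
  | [], _active => false
  | c :: rest, active =>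
    let pool := pats ++ active
    if pool.any (fun p => p.head? == some c && p.length == 1) then true
    else pvScan pats rest
      ((pool.filter (fun p => p.head? == some c && decide (1 < p.length))).map List.tail)

def is_invalid_response_alt (text : String) : Bool :=
  if text = "" then true
  else
    let t := PySem.Str.strip (PySem.Str.lower text)
    if PySem.Str.len t < 3 then true
    else pvScan (pvInvalidPatternsB.map String.toList) t.toList []

-- ===== PRECONDITION & SPEC =====
def Spec_is_invalid_response (text : String) (out : Bool) : Prop := out = is_invalid_response_alt text
instance (text : String) (out : Bool) : Decidable (Spec_is_invalid_response text out) := by unfold Spec_is_invalid_response; infer_instance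

-- ===== CLAIM (what is proved, stated in full; the proofs are below) =====
def Claim_equal_is_invalid_response : Prop := ∀ (text : String), Dom_is_invalid_response text → Spec_is_invalid_response text (is_invalid_response text)

-- ===== LEMMAS AND PROOFS =====

lemma pvPatternsB_eq : pvInvalidPatternsB = pvInvalidPatterns := by decide

lemma pvPatterns_ne_nil : ∀ p ∈ pvInvalidPatterns.map String.toList, p ≠ [] := by decide

lemma pvIsIn_nil (p : List Char) : PySem.Chars.isIn p [] = true ↔ p = [] := by
  rw [← PySem.Chars.exists_prefix_drop_iff_isIn]
  constructor
  · rintro ⟨j, hj⟩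
    simpa using List.prefix_nil.mp (by simpa using hj)
  · rintro rfl; exact ⟨0, List.nil_prefix⟩

lemma pvIsIn_cons (p : List Char) (c : Char) (rest : List Char) :
    PySem.Chars.isIn p (c :: rest) = true ↔ p <+: (c :: rest) ∨ PySem.Chars.isIn p rest = true := by
  rw [← PySem.Chars.exists_prefix_drop_iff_isIn, ← PySem.Chars.exists_prefix_drop_iff_isIn]
  constructor
  · rintro ⟨j, hj⟩
    cases j with
    | zero => exact Or.inl (by simpa using hj)
    | succ j => exact Or.inr ⟨j, by simpa using hj⟩
  · rintro (h | ⟨j, hj⟩)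
    · exact ⟨0, by simpa using h⟩
    · exact ⟨j + 1, by simpa using hj⟩

-- a nonempty suffix is a prefix of c::rest iff it is completed now (length 1, head c)
-- or it advances (head c, length > 1, tail prefix of rest)
lemma pvPrefix_cons (q : List Char) (c : Char) (rest : List Char) (hq : q ≠ []) :
    q <+: (c :: rest) ↔
      ((q.head? = some c ∧ q.length = 1) ∨ (q.head? = some c ∧ 1 < q.length ∧ q.tail <+: rest)) := by
  cases q with
  | nil => exact absurd rfl hq
  | cons x xs =>
    simp only [List.cons_prefix_cons, List.head?_cons, Option.some.injEq, List.length_cons,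
      List.tail_cons]
    cases xs with
    | nil => simp
    | cons y ys =>
      constructor
      · rintro ⟨rfl, h⟩; exact Or.inr ⟨rfl, by simp, h⟩
      · rintro (⟨rfl, h⟩ | ⟨rfl, _, h⟩)
        · simp at h
        · exact ⟨rfl, h⟩

-- correctness of the streaming scan
lemma pvScan_correct (pats : List (List Char)) (hp : ∀ p ∈ pats, p ≠ []) :
    ∀ (l : List Char) (active : List (List Char)), (∀ a ∈ active, a ≠ []) →
      (pvScan pats l active = true ↔
        (∃ p ∈ pats, PySem.Chars.isIn p l = true) ∨ (∃ a ∈ active, a <+: l)) := by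
  intro l
  induction l with
  | nil =>
    intro active ha
    simp only [pvScan]
    constructor
    · intro h; cases h
    · rintro (⟨p, hpm, hin⟩ | ⟨a, ham, hpre⟩)
      · exact absurd ((pvIsIn_nil p).mp hin) (hp p hpm)
      · exact absurd (List.prefix_nil.mp hpre) (ha a ham)
  | cons c rest ih =>
    intro active ha
    have hpool : ∀ q ∈ pats ++ active, q ≠ [] := by
      intro q hqm
      rcases List.mem_append.mp hqm with h | h
      · exact hp q h
      · exact ha q h
    have ha' : ∀ a ∈ ((pats ++ active).filter
        (fun p => p.head? == some c && decide (1 < p.length))).map List.tail, a ≠ [] := by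
      intro a ham
      obtain ⟨q, hqm, rfl⟩ := List.mem_map.mp ham
      have := (List.mem_filter.mp hqm).2
      simp only [Bool.and_eq_true, decide_eq_true_eq] at this
      intro hnil
      have : q.length ≤ 1 := by
        have := congrArg List.length hnil
        cases q <;> simp_all
      omega
    rw [show pvScan pats (c :: rest) active =
        (if (pats ++ active).any (fun p => p.head? == some c && p.length == 1) then true
         else pvScan pats rest
           (((pats ++ active).filter
              (fun p => p.head? == some c && decide (1 < p.length))).map List.tail)) from rfl]
    constructor
    · intro h
      split_ifs at h with hnow
      · -- some pattern/suffix completes at this character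
        obtain ⟨q, hqm, hq⟩ := List.any_eq_true.mp hnow
        simp only [Bool.and_eq_true, beq_iff_eq] at hq
        have hqpre : q <+: (c :: rest) :=
          (pvPrefix_cons q c rest (hpool q hqm)).mpr (Or.inl ⟨hq.1, by simpa using hq.2⟩)
        rcases List.mem_append.mp hqm with hm | hm
        · exact Or.inl ⟨q, hm, (pvIsIn_cons q c rest).mpr (Or.inl hqpre)⟩
        · exact Or.inr ⟨q, hm, hqpre⟩
      · rcases (ih _ ha').mp h with ⟨p, hm, hin⟩ | ⟨a, ham, hpre⟩
        · exact Or.inl ⟨p, hm, (pvIsIn_cons p c rest).mpr (Or.inr hin)⟩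
        · -- an advanced suffix matches the rest: its source q was in the pool
          obtain ⟨q, hqm, rfl⟩ := List.mem_map.mp ham
          have hg := (List.mem_filter.mp hqm).2
          have hqm' := (List.mem_filter.mp hqm).1
          simp only [Bool.and_eq_true, beq_iff_eq, decide_eq_true_eq] at hg
          have hqpre : q <+: (c :: rest) :=
            (pvPrefix_cons q c rest (hpool q hqm')).mpr (Or.inr ⟨hg.1, hg.2, hpre⟩)
          rcases List.mem_append.mp hqm' with hm | hm
          · exact Or.inl ⟨q, hm, (pvIsIn_cons q c rest).mpr (Or.inl hqpre)⟩
          · exact Or.inr ⟨q, hm, hqpre⟩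
    · intro h
      -- turn the containment statement into 'some pool element is a prefix now, or some pattern occurs later'
      have key : (∃ q ∈ pats ++ active, q <+: (c :: rest)) ∨
          (∃ p ∈ pats, PySem.Chars.isIn p rest = true) := by
        rcases h with ⟨p, hm, hin⟩ | ⟨a, ham, hpre⟩
        · rcases (pvIsIn_cons p c rest).mp hin with hpre | hin'
          · exact Or.inl ⟨p, List.mem_append.mpr (Or.inl hm), hpre⟩
          · exact Or.inr ⟨p, hm, hin'⟩
        · exact Or.inl ⟨a, List.mem_append.mpr (Or.inr ham), hpre⟩
      split_ifs with hnow
      · rfl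
      · rw [ih _ ha']
        rcases key with ⟨q, hqm, hqpre⟩ | hlater
        · rcases (pvPrefix_cons q c rest (hpool q hqm)).mp hqpre with ⟨h1, h2⟩ | ⟨h1, h2, h3⟩
          · -- would have fired the 'completed now' test: contradiction with hnow
            exact absurd (List.any_eq_true.mpr ⟨q, hqm, by simp [h1, h2]⟩) hnow
          · refine Or.inr ⟨q.tail, List.mem_map.mpr ⟨q, List.mem_filter.mpr ⟨hqm, ?_⟩, rfl⟩, h3⟩
            simp [h1, h2]
        · exact Or.inl hlater

theorem is_invalid_response_spec : Claim_equal_is_invalid_response := by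
  intro text _
  unfold Spec_is_invalid_response
  by_cases h1 : text = ""
  · simp only [is_invalid_response, is_invalid_response_alt, if_pos h1]
  · simp only [is_invalid_response, is_invalid_response_alt, if_neg h1]
    split_ifs with h2
    · rfl
    · rw [pvPatternsB_eq]
      rw [Bool.eq_iff_iff, List.any_eq_true,
        pvScan_correct (pvInvalidPatterns.map String.toList) pvPatterns_ne_nil _ []
          (by intro a ha; cases ha)]
      simp only [List.mem_map, PySem.Str.isIn_eq]
      constructor
      · rintro ⟨p, hm, hin⟩
        exact Or.inl ⟨p.toList, ⟨p, hm, rfl⟩, hin⟩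
      · rintro (⟨q, ⟨p, hm, rfl⟩, hin⟩ | ⟨a, ha, _⟩)
        · exact ⟨p, hm, hin⟩
        · cases ha
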